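-- pv_equiv track=rewrite | github.com/ar-hesoyam/PB_galois_field | PB_galois_field.py | add_vectors
-- ===== SOURCE A (Python) =====
-- def add_vectors(vector1, vector2):
--     res_vector = [0]*max(len(vector1), len(vector2))
--     if len(vector1) < len(vector2):
--         vector1 = [0]*abs(len(vector1) - len(vector2)) + vector1
--     if len(vector2) < len(vector1):
--         vector2 = [0]*abs(len(vector1) - len(vector2)) + vector2
--     for i in range(len(res_vector)):
--         res_vector[i] = vector1[i] ^ vector2[i]
--     return res_vector
-- ===== SOURCE B (Python) =====
-- def add_vectors(vector1, vector2):
--     k = min(len(vector1), len(vector2))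
--     head = vector1[:len(vector1) - k] + vector2[:len(vector2) - k]
--     tail = [a ^ b for a, b in zip(vector1[len(vector1) - k:], vector2[len(vector2) - k:])]
--     return head + tail
-- ===== Notes on version B (the rewrite author's own statement) =====
-- stated objective: simpler
-- what changed: Instead of building zero-padded copies of both vectors and writing into a preallocated result via an index loop, B slices off the unmatched prefix (copied verbatim, since x^0=x) and XORs the right-aligned suffixes with zip.
import Mathlib
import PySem

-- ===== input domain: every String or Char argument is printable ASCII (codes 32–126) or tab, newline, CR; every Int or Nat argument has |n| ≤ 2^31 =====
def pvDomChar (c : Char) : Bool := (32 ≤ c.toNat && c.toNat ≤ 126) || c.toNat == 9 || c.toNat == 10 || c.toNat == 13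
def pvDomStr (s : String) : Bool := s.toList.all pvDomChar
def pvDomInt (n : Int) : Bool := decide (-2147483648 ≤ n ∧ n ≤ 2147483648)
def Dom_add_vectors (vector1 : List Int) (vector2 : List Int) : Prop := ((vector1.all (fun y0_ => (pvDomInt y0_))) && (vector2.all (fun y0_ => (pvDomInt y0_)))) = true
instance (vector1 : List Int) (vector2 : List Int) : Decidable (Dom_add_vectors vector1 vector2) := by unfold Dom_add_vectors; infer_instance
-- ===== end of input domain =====

-- B replaces A's zero-padding plus preallocated index loop by slicing off the unmatched prefix and XOR-zipping the right-aligned suffixes (simpler decomposition, same cost).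


-- ===== PORT A =====
def add_vectors (vector1 : List Int) (vector2 : List Int) : List Int :=
  let res_vector := List.replicate (max vector1.length vector2.length) (0 : Int)
  let vector1' := if vector1.length < vector2.length
    then List.replicate ((vector1.length : Int) - (vector2.length : Int)).natAbs (0 : Int) ++ vector1
    else vector1
  let vector2' := if vector2.length < vector1'.length
    then List.replicate ((vector1'.length : Int) - (vector2.length : Int)).natAbs (0 : Int) ++ vector2
    else vector2
  (PySem.List.pyRange 0 (res_vector.length : Int) 1).foldl
    (fun r i => PySem.List.pySetD r i
      (PySem.Int.bxor (PySem.List.pyGetD vector1' i 0) (PySem.List.pyGetD vector2' i 0)))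
    res_vector

-- ===== PORT B =====
def add_vectors_alt (vector1 : List Int) (vector2 : List Int) : List Int :=
  let k := min vector1.length vector2.length
  let head := vector1.take (vector1.length - k) ++ vector2.take (vector2.length - k)
  let tail := (List.zip (vector1.drop (vector1.length - k)) (vector2.drop (vector2.length - k))).map
    (fun p => PySem.Int.bxor p.1 p.2)
  head ++ tail

-- ===== PRECONDITION & SPEC =====
def Spec_add_vectors (vector1 : List Int) (vector2 : List Int) (out : List Int) : Prop := out = add_vectors_alt vector1 vector2
instance (vector1 : List Int) (vector2 : List Int) (out : List Int) : Decidable (Spec_add_vectors vector1 vector2 out) := by unfold Spec_add_vectors; infer_instance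

-- ===== CLAIM (what is proved, stated in full; the proofs are below) =====
def Claim_equal_add_vectors : Prop := ∀ (vector1 : List Int) (vector2 : List Int), Dom_add_vectors vector1 vector2 → Spec_add_vectors vector1 vector2 (add_vectors vector1 vector2)

-- ===== LEMMAS AND PROOFS =====

-- writing g k into slot k for every k < n turns the first n entries into (range n).map g
lemma foldl_set_range (g : Nat → Int) : ∀ (n : Nat) (res : List Int), n ≤ res.length →
    (List.range n).foldl (fun r k => r.set k (g k)) res = (List.range n).map g ++ res.drop n := by
  intro n
  induction n with
  | zero => simp
  | succ n ih =>
    intro res hlen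
    rw [List.range_succ, List.foldl_append, List.map_append]
    rw [ih res (by omega)]
    simp only [List.foldl_cons, List.foldl_nil, List.map_singleton]
    have hm : ((List.range n).map g).length = n := by simp
    rw [List.set_append_right _ _ (by omega), hm]
    have : res.drop n = res[n] :: res.drop (n+1) := List.drop_eq_getElem_cons (by omega)
    rw [this]
    simp
    rw [this, List.set_cons_zero]

-- XOR against a zero vector is the identity
lemma zipWith_bxor_replicate_zero (l : List Int) :
    List.zipWith PySem.Int.bxor (List.replicate l.length 0) l = l := by
  induction l with
  | nil => simp
  | cons x xs ih =>
    simp [List.replicate_succ, ih, PySem.Int.bxor_comm]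

lemma zipWith_bxor_replicate_zero' (d : Nat) (l : List Int) (h : l.length = d) :
    List.zipWith PySem.Int.bxor (List.replicate d 0) l = l := by
  subst h; exact zipWith_bxor_replicate_zero l

-- A's loop body over range n, on lists of length n each, produces zipWith bxor
lemma loop_eq_zipWith (p1 p2 : List Int) (n : Nat) (h1 : p1.length = n) (h2 : p2.length = n) :
    (PySem.List.pyRange 0 (n : Int) 1).foldl
      (fun r i => PySem.List.pySetD r i
        (PySem.Int.bxor (PySem.List.pyGetD p1 i 0) (PySem.List.pyGetD p2 i 0)))
      (List.replicate n (0 : Int)) = List.zipWith PySem.Int.bxor p1 p2 := by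
  rw [PySem.List.pyRange_one]
  simp only [zero_add, Int.sub_zero, Int.toNat_natCast, List.foldl_map,
    PySem.List.pySetD_natCast, PySem.List.pyGetD_natCast]
  rw [foldl_set_range (fun k => PySem.Int.bxor (p1.getD k 0) (p2.getD k 0)) n
    (List.replicate n 0) (by simp)]
  apply List.ext_getElem
  · simp [h1, h2]
  · intro k hk hk2
    have hkn : k < n := by rw [List.length_zipWith, h1, h2] at hk2; omega
    simp [List.getElem_zipWith,
      List.getElem?_eq_getElem (show k < p1.length by omega),
      List.getElem?_eq_getElem (show k < p2.length by omega)]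

-- A computes zipWith bxor of the two zero-padded vectors
lemma add_vectors_eq_zipWith (v1 v2 : List Int) :
    add_vectors v1 v2 = List.zipWith PySem.Int.bxor
      (List.replicate (max v1.length v2.length - v1.length) 0 ++ v1)
      (List.replicate (max v1.length v2.length - v2.length) 0 ++ v2) := by
  simp only [add_vectors, List.length_replicate]
  by_cases h : v1.length < v2.length
  · have hn : (((v1.length : Int) - (v2.length : Int)).natAbs) = v2.length - v1.length := by omega
    rw [if_pos h, hn]
    have hL : (List.replicate (v2.length - v1.length) (0:Int) ++ v1).length = v2.length := by
      simp; omega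
    rw [if_neg (by rw [hL]; omega)]
    have hmax : max v1.length v2.length = v2.length := by omega
    rw [hmax, loop_eq_zipWith _ _ _ hL rfl]
    simp
  · rw [if_neg h]
    by_cases h2 : v2.length < v1.length
    · have hn : (((v1.length : Int) - (v2.length : Int)).natAbs) = v1.length - v2.length := by omega
      rw [if_pos h2, hn]
      have hL : (List.replicate (v1.length - v2.length) (0:Int) ++ v2).length = v1.length := by
        simp; omega
      have hmax : max v1.length v2.length = v1.length := by omega
      rw [hmax, loop_eq_zipWith _ _ _ rfl hL]
      simp
    · rw [if_neg h2]
      have heq : v1.length = v2.length := by omega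
      have hmax : max v1.length v2.length = v2.length := by omega
      rw [hmax, loop_eq_zipWith _ _ _ heq rfl]
      simp [heq]

lemma map_zip_eq_zipWith : ∀ (xs ys : List Int),
    (List.zip xs ys).map (fun p => PySem.Int.bxor p.1 p.2) = List.zipWith PySem.Int.bxor xs ys := by
  intro xs
  induction xs with
  | nil => intro ys; simp
  | cons x xs ih => intro ys; cases ys with
    | nil => simp
    | cons y ys => simp [ih]

-- B computes the same zipWith of the padded vectors
lemma add_vectors_alt_eq_zipWith (v1 v2 : List Int) :
    add_vectors_alt v1 v2 = List.zipWith PySem.Int.bxor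
      (List.replicate (max v1.length v2.length - v1.length) 0 ++ v1)
      (List.replicate (max v1.length v2.length - v2.length) 0 ++ v2) := by
  simp only [add_vectors_alt, map_zip_eq_zipWith]
  by_cases hle : v1.length ≤ v2.length
  · have hk : min v1.length v2.length = v1.length := by omega
    have hmax : max v1.length v2.length = v2.length := by omega
    rw [hk, hmax, Nat.sub_self]
    simp only [List.take_zero, List.drop_zero, List.nil_append, Nat.sub_self,
      List.replicate_zero]
    set d := v2.length - v1.length with hd
    conv_rhs => rw [← List.take_append_drop d v2]
    rw [List.zipWith_append (by simp; omega)]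
    rw [zipWith_bxor_replicate_zero' d (v2.take d) (by simp; omega)]
  · have hk : min v1.length v2.length = v2.length := by omega
    have hmax : max v1.length v2.length = v1.length := by omega
    rw [hk, hmax, Nat.sub_self]
    simp only [List.take_zero, List.drop_zero, List.append_nil, Nat.sub_self,
      List.replicate_zero, List.nil_append]
    set d := v1.length - v2.length with hd
    conv_rhs => rw [← List.take_append_drop d v1]
    rw [List.zipWith_append (by simp; omega)]
    rw [List.zipWith_comm_of_comm (fun a b => PySem.Int.bxor_comm a b) (l := v1.take d) (l' := List.replicate d 0)]
    rw [zipWith_bxor_replicate_zero' d (v1.take d) (by simp; omega)]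

-- ===== VERDICT (by name: the statement is the Claim_ definition above) =====
theorem add_vectors_spec : Claim_equal_add_vectors := by
  intro v1 v2 _
  unfold Spec_add_vectors
  rw [add_vectors_eq_zipWith, add_vectors_alt_eq_zipWith]
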